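-- pv_equiv track=rewrite | github.com/feisuxiaozhu/linear-programming | orderedSearchPure.py | generatePureInputs
-- ===== SOURCE A (Python) =====
-- def generatePureInputs(N):
-- # return all pure inputs of length N. If N = 3, return [001,011]
--     res=[]
--     for i in range(1,N):
--         tail = "1" * i
--         head = "0" * (N-i)
--         temp = head+tail
--         res.append(temp)
--     return res
-- ===== SOURCE B (Python) =====
-- def generatePureInputs(N):
--     # slide a length-N window over one prebuilt base string
--     base = "0" * (N - 1) + "1" * (N - 1)
--     return [base[s:s + N] for s in range(N - 1)]
-- ===== Notes on version B (the rewrite author's own statement) =====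
-- stated objective: alternative
-- what changed: B builds one base string '0'*(N-1)+'1'*(N-1) and returns its N-1 sliding length-N windows, instead of concatenating two fresh replicate strings per iteration.
import Mathlib
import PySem

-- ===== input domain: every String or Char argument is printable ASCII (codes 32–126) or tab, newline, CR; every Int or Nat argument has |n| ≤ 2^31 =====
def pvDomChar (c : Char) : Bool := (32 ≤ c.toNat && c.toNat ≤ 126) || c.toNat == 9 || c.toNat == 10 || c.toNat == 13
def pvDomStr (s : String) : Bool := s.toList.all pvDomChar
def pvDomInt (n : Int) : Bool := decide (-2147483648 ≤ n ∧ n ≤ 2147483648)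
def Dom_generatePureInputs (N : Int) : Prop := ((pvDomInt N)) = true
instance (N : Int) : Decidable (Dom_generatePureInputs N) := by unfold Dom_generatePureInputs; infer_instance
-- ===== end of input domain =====

-- B replaces per-iteration string building by N-1 sliding length-N windows of one
-- prebuilt base string '0'*(N-1)+'1'*(N-1); alternative decomposition, same cost.

-- ===== PORT A =====
def generatePureInputs (N : Int) : List String :=
  (PySem.List.pyRange 1 N 1).foldl
    (fun res i =>
      let tail := List.replicate i.toNat '1'
      let head := List.replicate (N - i).toNat '0'
      let temp := head ++ tail
      res ++ [String.ofList temp]) []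

-- ===== PORT B =====
def generatePureInputs_alt (N : Int) : List String :=
  let base := List.replicate (N - 1).toNat '0' ++ List.replicate (N - 1).toNat '1'
  (PySem.List.pyRange 0 (N - 1) 1).map
    (fun s => String.ofList (PySem.List.slice base (some s) (some (s + N))))

-- ===== PRECONDITION & SPEC =====
def Spec_generatePureInputs (N : Int) (out : List String) : Prop := out = generatePureInputs_alt N
instance (N : Int) (out : List String) : Decidable (Spec_generatePureInputs N out) := by unfold Spec_generatePureInputs; infer_instance

-- ===== CLAIM (what is proved, stated in full; the proofs are below) =====
def Claim_equal_generatePureInputs : Prop := ∀ (N : Int), Dom_generatePureInputs N → Spec_generatePureInputs N (generatePureInputs N)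

-- ===== LEMMAS AND PROOFS =====

-- taking a length-(M+1) window at offset k < M of '0'*M ++ '1'*M yields '0'*(M-k) ++ '1'*(k+1)
theorem pvWindow (M k : Nat) (hk : k < M) :
  ((List.replicate M '0' ++ List.replicate M '1').drop k).take (M+1)
  = List.replicate (M - k) '0' ++ List.replicate (k+1) '1' := by
  rw [List.drop_append_of_le_length (by simp; omega), List.drop_replicate,
      List.take_append]
  simp only [List.take_replicate, List.length_replicate]
  rw [Nat.min_eq_right (by omega), show M+1-(M-k)=k+1 by omega, Nat.min_eq_left (by omega)]

-- B's window s corresponds to A's iteration i = s + 1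
theorem pvSliceEq (N : Int) (k : Nat) (hk : k < (N-1).toNat) :
    PySem.List.slice (List.replicate (N - 1).toNat '0' ++ List.replicate (N - 1).toNat '1')
      (some ((0:Int) + k)) (some ((0:Int) + k + N))
    = List.replicate (N - (1 + k)).toNat '0' ++ List.replicate ((1:Int) + k).toNat '1' := by
  rw [PySem.List.slice_toNat _ (by omega) (by omega),
      show ((0:Int) + k).toNat = k by omega,
      show ((0:Int) + k + N).toNat - k = (N-1).toNat + 1 by omega,
      pvWindow (N-1).toNat k hk,
      show (N - (1 + (k:Int))).toNat = (N-1).toNat - k by omega,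
      show ((1:Int) + k).toNat = k + 1 by omega]

-- ===== VERDICT (by name: the statement is the Claim_ definition above) =====
theorem generatePureInputs_spec : Claim_equal_generatePureInputs := by
  intro N _
  unfold Spec_generatePureInputs generatePureInputs generatePureInputs_alt
  rw [PySem.List.foldl_append_singleton_eq_map,
      PySem.List.pyRange_one 1 N, PySem.List.pyRange_one 0 (N-1)]
  simp only [List.map_map, sub_zero, List.nil_append]
  refine List.map_congr_left (fun k hk => ?_)
  have hk' : k < (N-1).toNat := List.mem_range.mp hk
  simp only [Function.comp_apply]
  rw [pvSliceEq N k hk']
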